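-- pv_equiv track=rewrite | github.com/rahulsamant37/Daily-Task | Python/Strick/python_question_32.py | find_largest_digit_product
-- ===== SOURCE A (Python) =====
-- def find_largest_digit_product(number):
--     # Check if the number is less than 10
--     if number < 10:
--         return number
--
--     # Find the digits of the number
--     digits = str(number)
--
--     # Initialize the largest digit product as 1
--     largest_digit_product = 1
--
--     # Loop through each digit and calculate its product
--     for digit in digits:
--         # Calculate the product of the current digit
--         current_digit_product = int(digit) * find_largest_digit_product(int(digit))
--
--         # Update the largest digit product if the current digit product is greater
--         largest_digit_product = max(largest_digit_product, current_digit_product)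
--
--     return largest_digit_product
-- ===== SOURCE B (Python) =====
-- def find_largest_digit_product(number):
--     if number < 10:
--         return number
--     md = max(int(d) for d in str(number))
--     return md * md
-- ===== Notes on version B (the rewrite author's own statement) =====
-- stated objective: simpler
-- what changed: Replaces A's per-digit product-and-max loop with a degenerate recursive call by a single max-digit scan followed by one squaring (the recursion always returns the digit itself, so A computes max(1, max digit^2) = (max digit)^2).
import Mathlib
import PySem

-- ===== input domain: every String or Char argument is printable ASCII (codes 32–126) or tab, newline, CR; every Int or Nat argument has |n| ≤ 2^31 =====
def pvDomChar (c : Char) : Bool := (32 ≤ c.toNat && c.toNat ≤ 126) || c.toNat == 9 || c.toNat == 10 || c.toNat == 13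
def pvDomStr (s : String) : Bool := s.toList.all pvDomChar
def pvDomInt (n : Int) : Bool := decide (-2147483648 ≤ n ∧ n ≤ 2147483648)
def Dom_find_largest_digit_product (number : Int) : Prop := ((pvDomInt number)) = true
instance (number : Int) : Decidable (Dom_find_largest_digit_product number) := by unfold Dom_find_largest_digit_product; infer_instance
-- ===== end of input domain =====

-- B computes the max digit once and squares it, replacing A's per-digit product loop with its
-- degenerate recursive call; objective: simpler.


-- ===== PORT A =====
-- every char of Nat.toDigitsCore is a digit char (or comes from the accumulator); needed by the
-- port's termination proof, hence stated above it
theorem pvTdcMem (fuel : ℕ) : ∀ (n : ℕ) (acc : List Char) (c : Char),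
    c ∈ Nat.toDigitsCore 10 fuel n acc → (∃ m : ℕ, m < 10 ∧ c = Nat.digitChar m) ∨ c ∈ acc := by
  induction fuel with
  | zero => intro n acc c hc; simp [Nat.toDigitsCore] at hc; exact Or.inr hc
  | succ f ih =>
    intro n acc c hc
    simp only [Nat.toDigitsCore] at hc
    split at hc
    · rcases List.mem_cons.mp hc with h | h
      · exact Or.inl ⟨n % 10, by omega, h⟩
      · exact Or.inr h
    · rcases ih (n / 10) (Nat.digitChar (n % 10) :: acc) c hc with h | h
      · exact Or.inl h
      · rcases List.mem_cons.mp h with h | h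
        · exact Or.inl ⟨n % 10, by omega, h⟩
        · exact Or.inr h

-- int(c) for a digit char c = digitChar m, m < 10; needed by the port's termination proof
theorem pvDigitCharVal (m : ℕ) (hm : m < 10) :
    (PySem.Int.ofChars? [Nat.digitChar m]).getD 0 = (m : Int) := by
  interval_cases m <;> decide

-- membership in str(number) for number ≥ 10 gives a digit char; used by termination
theorem pvMemToChars (number : Int) (h : ¬ number < 10) (c : Char)
    (hc : c ∈ (PySem.Int.toStr number).toList) : ∃ m : ℕ, m < 10 ∧ c = Nat.digitChar m := by
  rw [PySem.Int.toList_toStr] at hc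
  unfold PySem.Int.toChars at hc
  rw [if_neg (by omega)] at hc
  unfold Nat.toDigits at hc
  rcases pvTdcMem _ _ _ _ hc with h' | h'
  · exact h'
  · simp at h'

def find_largest_digit_product (number : Int) : Int :=
  if number < 10 then number
  else
    -- for digit in str(number): current = int(digit) * rec(int(digit)); largest = max(largest, current)
    ((PySem.Int.toStr number).toList.attach).foldl
      (fun largest c =>
        let d := (PySem.Int.ofStr? (String.singleton c.1)).getD 0
        max largest (d * find_largest_digit_product d)) 1
termination_by number.toNat
decreasing_by
  rcases pvMemToChars number (by assumption) c.1 c.2 with ⟨m, hm, hc⟩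
  simp only [PySem.Int.ofStr?, String.toList_singleton, hc, pvDigitCharVal m hm]
  omega

-- ===== PORT B =====
def find_largest_digit_product_alt (number : Int) : Int :=
  if number < 10 then number
  else
    -- md = max(int(d) for d in str(number)); str(number) is nonempty so Python's max never raises
    match PySem.List.max?
        ((PySem.Int.toStr number).toList.map (fun c => (PySem.Int.ofStr? (String.singleton c)).getD 0))
        (fun x => x) with
    | some md => md * md
    | none => 0  -- unreachable: str(number) ≠ ""

-- ===== PRECONDITION & SPEC =====
def Spec_find_largest_digit_product (number : Int) (out : Int) : Prop := out = find_largest_digit_product_alt number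
instance (number : Int) (out : Int) : Decidable (Spec_find_largest_digit_product number out) := by unfold Spec_find_largest_digit_product; infer_instance

-- ===== CLAIM (what is proved, stated in full; the proofs are below) =====
def Claim_equal_find_largest_digit_product : Prop := ∀ (number : Int), Dom_find_largest_digit_product number → Spec_find_largest_digit_product number (find_largest_digit_product number)

-- ===== LEMMAS AND PROOFS =====

-- the leading digit of n ≥ 1 is ≥ 1
theorem pvTdcHead (fuel : ℕ) : ∀ (n : ℕ) (acc : List Char), 0 < n → n ≤ fuel →
    ∃ (m : ℕ) (rest : List Char), 0 < m ∧ m < 10 ∧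
      Nat.toDigitsCore 10 fuel n acc = Nat.digitChar m :: rest := by
  induction fuel with
  | zero => intro n acc h1 h2; omega
  | succ f ih =>
    intro n acc h1 h2
    simp only [Nat.toDigitsCore]
    split
    · exact ⟨n % 10, acc, by omega, by omega, rfl⟩
    · have hd : n / 10 < n := Nat.div_lt_self h1 (by omega)
      exact ih (n / 10) _ (by omega) (by omega)

-- max-and-square fold = square of max fold, for nonnegative values
theorem pvFoldSq : ∀ (vs : List Int) (L : Int), (∀ v ∈ vs, 0 ≤ v) → 0 ≤ L →
    vs.foldl (fun lp v => max lp (v * v)) (L * L) = (vs.foldl max L) * (vs.foldl max L) := by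
  intro vs
  induction vs with
  | nil => intro L _ _; rfl
  | cons v vt ih =>
    intro L hvs hL
    have hv : 0 ≤ v := hvs v (List.mem_cons_self ..)
    have hsq : max (L * L) (v * v) = (max L v) * (max L v) := by
      rcases le_total L v with h | h
      · rw [max_eq_right h, max_eq_right (mul_self_le_mul_self hL h)]
      · rw [max_eq_left h, max_eq_left (mul_self_le_mul_self hv h)]
    simp only [List.foldl_cons, hsq]
    exact ih (max L v) (fun x hx => hvs x (List.mem_cons_of_mem _ hx)) (le_max_of_le_left hL)

-- A returns its argument on every digit value
theorem pvABase (m : ℕ) (hm : m < 10) : find_largest_digit_product (m : Int) = (m : Int) := by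
  rw [find_largest_digit_product]
  rw [if_pos (by exact_mod_cast hm)]

-- ===== VERDICT (by name: the statement is the Claim_ definition above) =====
theorem find_largest_digit_product_spec : Claim_equal_find_largest_digit_product := by
  intro number _
  unfold Spec_find_largest_digit_product
  by_cases h : number < 10
  · rw [find_largest_digit_product, find_largest_digit_product_alt, if_pos h, if_pos h]
  · rw [find_largest_digit_product, find_largest_digit_product_alt, if_neg h, if_neg h]
    set cs := (PySem.Int.toStr number).toList with hcs
    -- str(number) = digitChar m0 :: rest with leading digit m0 ≥ 1
    have hnum : (0:Int) ≤ number := by omega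
    obtain ⟨m0, rest, hm0pos, hm0lt, hsplit⟩ :
        ∃ (m0 : ℕ) (rest : List Char), 0 < m0 ∧ m0 < 10 ∧ cs = Nat.digitChar m0 :: rest := by
      have : cs = Nat.toDigitsCore 10 (number.toNat + 1) number.toNat [] := by
        rw [hcs, PySem.Int.toList_toStr]
        unfold PySem.Int.toChars
        rw [if_neg (by omega)]
        rfl
      rw [this]
      exact pvTdcHead _ _ _ (by omega) (by omega)
    -- evaluate the digit-value function
    set dv : Char → Int := fun c => (PySem.Int.ofStr? (String.singleton c)).getD 0 with hdv
    have hdvval : ∀ m : ℕ, m < 10 → dv (Nat.digitChar m) = (m : Int) := by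
      intro m hm
      simp only [hdv, PySem.Int.ofStr?, String.toList_singleton, pvDigitCharVal m hm]
    -- A's fold over the attached list = fold of max-square over the digit values
    have hA : cs.attach.foldl
        (fun largest c => max largest (dv c.1 * find_largest_digit_product (dv c.1))) 1
        = (cs.map dv).foldl (fun lp v => max lp (v * v)) 1 := by
      rw [List.foldl_attach (l := cs)
        (f := fun (largest : Int) (c : Char) =>
          let d := (PySem.Int.ofStr? (String.singleton c)).getD 0
          max largest (d * find_largest_digit_product d)) (b := 1), List.foldl_map]
      apply PySem.List.foldl_congr_mem
      intro lp c hc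
      rcases pvMemToChars number h c (hcs ▸ hc) with ⟨m, hm, hcm⟩
      rw [hcm]
      simp only [PySem.Int.ofStr?, String.toList_singleton, pvDigitCharVal m hm, pvABase m hm]
      rw [hdvval m hm]
    rw [hA, hsplit, List.map_cons, hdvval m0 hm0lt]
    rw [PySem.List.max?_id_cons]
    have hall : ∀ v ∈ (rest.map dv), 0 ≤ v := by
      intro v hv
      rcases List.mem_map.mp hv with ⟨c, hc, hcv⟩
      have hcin : c ∈ cs := hsplit ▸ List.mem_cons_of_mem _ hc
      rcases pvMemToChars number h c hcin with ⟨m, hm, hcm⟩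
      rw [← hcv, hcm, hdvval m hm]
      positivity
    rw [List.foldl_cons]
    have hm1 : (1:Int) ≤ (m0:Int) := by exact_mod_cast hm0pos
    have hmax : max (1:Int) ((m0:Int) * (m0:Int)) = (m0:Int) * (m0:Int) := max_eq_right (by nlinarith)
    rw [hmax, pvFoldSq _ _ hall (by positivity)]
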